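-- pv_equiv track=rewrite | github.com/scottsha/gotham-city-music-collective-website | gcmc_program_genie/program_leaflet_genie.py | latex_multicol_formatting
-- ===== SOURCE A (Python) =====
-- def split_list(input_list, num_cols):
--     quo, rem = divmod(len(input_list), num_cols)
--     return [input_list[i * quo + min(i, rem):(i + 1) * quo + min(i + 1, rem)] for i in range(num_cols)]
--
-- def latex_multicol_formatting(xxs: list[str], num_cols=3) -> str:
--     columns = split_list(xxs, num_cols)
--     col_strs = []
--     for col_entry in columns:
--         col_strs.append(
--             "\\\\\n".join(col_entry)
--         )
--     singer_txt = "\\null\n\\columnbreak\n\n".join(col_strs)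
--     return singer_txt
-- ===== SOURCE B (Python) =====
-- def latex_multicol_formatting(xxs: list[str], num_cols=3) -> str:
--     # Greedy peeling: each step takes the ceiling share of the items not yet
--     # placed as the next column and continues with one column fewer.
--     cols = []
--     start = 0
--     k = num_cols
--     while k > 0:
--         c = -(-(len(xxs) - start) // k)  # ceil(remaining / k)
--         cols.append(xxs[start:start + c])
--         start += c
--         k -= 1
--     return "\\null\n\\columnbreak\n\n".join("\\\\\n".join(col) for col in cols)
-- ===== Notes on version B (the rewrite author's own statement) =====
-- stated objective: alternative
-- what changed: Replaced the closed-form min-based slice boundaries over range(num_cols) by iterative peeling: each step computes the ceiling share -(-len(xs)//k) of the remaining items as the next column and continues on the rest with one column fewer, recomputing the division each step; the join logic is unchanged.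
import Mathlib
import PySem

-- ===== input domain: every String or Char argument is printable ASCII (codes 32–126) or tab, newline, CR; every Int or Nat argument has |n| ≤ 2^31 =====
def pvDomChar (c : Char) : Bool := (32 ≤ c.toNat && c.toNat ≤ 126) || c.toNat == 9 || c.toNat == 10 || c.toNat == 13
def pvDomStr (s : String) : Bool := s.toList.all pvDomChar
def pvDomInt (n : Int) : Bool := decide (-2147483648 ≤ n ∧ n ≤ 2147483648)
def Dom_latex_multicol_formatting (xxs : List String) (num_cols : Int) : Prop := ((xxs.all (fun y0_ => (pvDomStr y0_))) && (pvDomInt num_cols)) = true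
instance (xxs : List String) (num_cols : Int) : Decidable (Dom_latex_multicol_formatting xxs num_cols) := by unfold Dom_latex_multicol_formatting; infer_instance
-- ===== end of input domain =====

-- B replaces A's closed-form min-based slice boundaries by iterative peeling (each step takes the ceiling share of the remainder as the next column); objective: alternative.

-- ===== PORT A =====
-- split_list: quo, rem = divmod(len(input_list), num_cols); comprehension over range(num_cols)
def split_list (input_list : List String) (num_cols : Int) : List (List String) :=
  match PySem.Int.divmod? (input_list.length : Int) num_cols with
  | none => []  -- ZeroDivisionError: excluded by Pre_
  | some (quo, rem) =>
      (PySem.List.pyRange 0 num_cols 1).map (fun i =>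
        PySem.List.slice input_list (some (i * quo + min i rem)) (some ((i + 1) * quo + min (i + 1) rem)))

def latex_multicol_formatting (xxs : List String) (num_cols : Int) : String :=
  let columns := split_list xxs num_cols
  let col_strs := columns.foldl (fun acc col_entry => acc ++ [PySem.Str.join "\\\\\n" col_entry]) []
  PySem.Str.join "\\null\n\\columnbreak\n\n" col_strs

-- ===== PORT B =====
-- the while loop: while k > 0: c = -(-(len(xxs)-start)//k); cols.append(xxs[start:start+c]); start += c; k -= 1
def pvLoopB (xxs : List String) (start : Int) (k : Int) (cols : List (List String)) : List (List String) :=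
  if h : k ≤ 0 then cols
  else
    pvLoopB xxs (start + -(PySem.Int.floordiv (-((xxs.length : Int) - start)) k)) (k - 1)
      (cols ++ [PySem.List.slice xxs (some start) (some (start + -(PySem.Int.floordiv (-((xxs.length : Int) - start)) k)))])
termination_by k.toNat
decreasing_by omega

def latex_multicol_formatting_alt (xxs : List String) (num_cols : Int) : String :=
  PySem.Str.join "\\null\n\\columnbreak\n\n"
    ((pvLoopB xxs 0 num_cols []).map (fun col => PySem.Str.join "\\\\\n" col))

-- ===== PRECONDITION & SPEC =====
-- Pre_ excludes exactly num_cols = 0, on which Python's divmod in A raises ZeroDivisionError.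
def Pre_latex_multicol_formatting (xxs : List String) (num_cols : Int) : Prop := num_cols ≠ 0
instance (xxs : List String) (num_cols : Int) : Decidable (Pre_latex_multicol_formatting xxs num_cols) := by unfold Pre_latex_multicol_formatting; infer_instance
def pvWitness_latex_multicol_formatting : List String × Int := (["a", "b", "c"], 2)

def Spec_latex_multicol_formatting (xxs : List String) (num_cols : Int) (out : String) : Prop := out = latex_multicol_formatting_alt xxs num_cols
instance (xxs : List String) (num_cols : Int) (out : String) : Decidable (Spec_latex_multicol_formatting xxs num_cols out) := by unfold Spec_latex_multicol_formatting; infer_instance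

-- ===== CLAIM (what is proved, stated in full; the proofs are below) =====
def Claim_equal_latex_multicol_formatting : Prop := ∀ (xxs : List String) (num_cols : Int), Dom_latex_multicol_formatting xxs num_cols → Pre_latex_multicol_formatting xxs num_cols → Spec_latex_multicol_formatting xxs num_cols (latex_multicol_formatting xxs num_cols)
-- ===== LEMMAS AND PROOFS =====

-- B's greedy peeling loop produces exactly A's min-bounded columns, shifted by the running start
theorem pv_loopB_eq : ∀ (mm : Nat) (k : Int), k.toNat = mm → 0 < k →
    ∀ (xxs : List String) (start : Int) (cols : List (List String)), 0 ≤ start → start ≤ (xxs.length : Int) →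
    pvLoopB xxs start k cols = cols ++ (PySem.List.pyRange 0 k 1).map (fun i =>
      PySem.List.slice xxs
        (some (start + (i * PySem.Int.floordiv ((xxs.length : Int) - start) k + min i (PySem.Int.mod ((xxs.length : Int) - start) k))))
        (some (start + ((i + 1) * PySem.Int.floordiv ((xxs.length : Int) - start) k + min (i + 1) (PySem.Int.mod ((xxs.length : Int) - start) k))))) := by
  intro mm
  induction mm with
  | zero => intro k hm hk; omega
  | succ mm ih =>
    intro k hm hk xxs start cols hs0 hsn
    set n : Int := (xxs.length : Int) with hn
    set q : Int := PySem.Int.floordiv (n - start) k with hq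
    set r : Int := PySem.Int.mod (n - start) k with hr
    have hr0 : 0 ≤ r := PySem.Int.mod_nonneg (n - start) hk
    have hrk : r < k := PySem.Int.mod_lt (n - start) hk
    have hqr : q * k + r = n - start := PySem.Int.floordiv_mul_add_mod (n - start) k
    have hq0 : 0 ≤ q := by
      rw [hq, PySem.Int.floordiv_eq_ediv_of_pos hk]
      exact Int.ediv_nonneg (by omega) (le_of_lt hk)
    have hqk : q ≤ q * k := le_mul_of_one_le_right hq0 hk
    set c : Int := q + (if 0 < r then 1 else 0) with hcdef
    have hc0 : 0 ≤ c := by rw [hcdef]; split_ifs <;> omega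
    have hcm : c ≤ n - start := by rw [hcdef]; split_ifs <;> omega
    have hc : -(PySem.Int.floordiv (-(n - start)) k) = c := by
      rw [PySem.Int.neg_floordiv_neg_eq_iff_of_pos hk, hcdef]
      split_ifs with h
      · have e1 : (q + 1 - 1) * k = q * k := by ring
        have e2 : (q + 1) * k = q * k + k := by ring
        rw [e1, e2]
        omega
      · have e1 : (q + 0 - 1) * k = q * k - k := by ring
        have e2 : (q + 0) * k = q * k := by ring
        rw [e1, e2]
        omega
    rw [pvLoopB]
    rw [dif_neg (by omega : ¬ k ≤ 0)]
    rw [← hn, hc]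
    rw [PySem.List.pyRange_one_cons hk, List.map_cons]
    have hhead : PySem.List.slice xxs (some start) (some (start + c))
        = PySem.List.slice xxs (some (start + (0 * q + min 0 r))) (some (start + ((0 + 1) * q + min (0 + 1) r))) := by
      have e0 : start + ((0 : Int) * q + min 0 r) = start := by
        have : min (0 : Int) r = 0 := by omega
        simp [this]
      have e1 : start + (((0 : Int) + 1) * q + min (0 + 1) r) = start + c := by
        have : min (1 : Int) r = (if 0 < r then 1 else 0) := by split_ifs <;> omega
        rw [hcdef]; simp [this]
      rw [e0, e1]
    by_cases hk1 : k = 1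
    · subst hk1
      rw [pvLoopB, dif_pos (by omega : (1:Int) - 1 ≤ 0)]
      have : PySem.List.pyRange (0 + 1) 1 1 = [] := PySem.List.pyRange_one_eq_nil (by omega)
      rw [this, List.map_nil, hhead]
    · -- 1 < k
      have hk2 : 0 < k - 1 := by omega
      rw [ih (k - 1) (by omega) hk2 xxs (start + c) _ (by omega) (by omega)]
      set r2 : Int := if 0 < r then r - 1 else 0 with hr2
      have hsplit : n - (start + c) = q * (k - 1) + r2 := by
        have e : q * (k - 1) = q * k - q := by ring
        rw [hr2, hcdef]; split_ifs <;> omega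
      have hr20 : 0 ≤ r2 := by rw [hr2]; split_ifs <;> omega
      have hr2k : r2 < k - 1 := by rw [hr2]; split_ifs <;> omega
      have hq2 : PySem.Int.floordiv (n - (start + c)) (k - 1) = q := by
        refine (PySem.Int.floordiv_eq_iff_of_pos hk2).mpr ⟨by omega, ?_⟩
        have e : (q + 1) * (k - 1) = q * (k - 1) + (k - 1) := by ring
        omega
      have hr' : PySem.Int.mod (n - (start + c)) (k - 1) = r2 := by
        have := PySem.Int.floordiv_mul_add_mod (n - (start + c)) (k - 1)
        rw [hq2] at this
        omega
      rw [hhead, List.append_assoc, List.singleton_append]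
      congr 2
      -- tail: reindex pyRange 0 (k-1) against pyRange 1 k
      rw [← hn]
      simp only [hq2, hr']
      have h01 : (0 : Int) + 1 = 1 := by norm_num
      rw [h01, PySem.List.pyRange_one 0 (k - 1), PySem.List.pyRange_one 1 k]
      have hlen : (k - 1 - 0).toNat = (k - 1).toNat := by omega
      rw [hlen, List.map_map, List.map_map]
      apply List.map_congr_left
      intro j _
      simp only [Function.comp_apply]
      have hz : (0 : Int) + (j : Int) = (j : Int) := by ring
      have ho : (1 : Int) + (j : Int) = (j : Int) + 1 := by ring
      rw [hz, ho]
      have hj0 : (0 : Int) ≤ (j : Int) := by positivity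
      have hjq0 : 0 ≤ (j : Int) * q := mul_nonneg hj0 hq0
      have hjq1 : 0 ≤ ((j : Int) + 1) * q := mul_nonneg (by omega) hq0
      have bnd : ∀ (i : Int), 0 ≤ i → 0 ≤ i * q →
          (start + c) + (i * q + min i r2) = start + ((i + 1) * q + min (i + 1) r) := by
        intro i hi hiq
        have e : (i + 1) * q = i * q + q := by ring
        rw [hcdef, hr2]
        split_ifs with h
        · have hm : min (i + 1) r = min i (r - 1) + 1 := by omega
          omega
        · have hm1 : min (i + 1) r = 0 := by omega
          have hm2 : min i (0 : Int) = 0 := by omega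
          omega
      have h1 := bnd (j : Int) hj0 hjq0
      have h2 := bnd ((j : Int) + 1) (by omega) hjq1
      rw [h1, h2]

-- ===== VERDICT (by name: the statement is the Claim_ definition above) =====
theorem latex_multicol_formatting_spec : Claim_equal_latex_multicol_formatting := by
  intro xxs num_cols _ hpre
  unfold Spec_latex_multicol_formatting latex_multicol_formatting latex_multicol_formatting_alt split_list
  cases hdm : PySem.Int.divmod? (xxs.length : Int) num_cols with
  | none =>
      exfalso
      exact hpre (by simpa [PySem.Int.divmod?] using hdm)
  | some qr =>
      obtain ⟨quo, rem⟩ := qr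
      have hqr2 : quo = PySem.Int.floordiv (xxs.length : Int) num_cols ∧ rem = PySem.Int.mod (xxs.length : Int) num_cols := by
        simp [PySem.Int.divmod?] at hdm
        simp [PySem.Int.floordiv, PySem.Int.mod]
        exact ⟨hdm.2.1.symm, hdm.2.2.symm⟩
      obtain ⟨hquo, hrem⟩ := hqr2
      simp only [PySem.List.foldl_append_singleton_eq_map, List.nil_append]
      by_cases hpos : 0 < num_cols
      · have hz : (xxs.length : Int) - 0 = (xxs.length : Int) := by ring
        rw [pv_loopB_eq num_cols.toNat num_cols rfl hpos xxs 0 [] le_rfl (by positivity),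
            List.nil_append, hz, hquo, hrem]
        simp only [zero_add, List.map_map]
      · rw [pvLoopB, dif_pos (by omega : num_cols ≤ 0),
            PySem.List.pyRange_one_eq_nil (by omega : num_cols ≤ 0)]
        simp
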